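-- pv_equiv track=rewrite | github.com/GonzaloPulido/ProgramacionCarpeta | Python/Examenes/Examen 2/parte1.py | sumados
-- ===== SOURCE A (Python) =====
-- def sumados(numero):
--     lista = list()
--     numero = str(numero)
--     for x in numero:
--         lista.append(int(x))
--     if lista[0] + lista[1] == lista[2]:
--         return True
--     elif lista[1] + lista[2] == lista[0]:
--         return True
--     elif lista[0] + lista[2] == lista[1]:
--         return True
--     return False
-- ===== SOURCE B (Python) =====
-- def sumados(numero):
--     d = [int(x) for x in str(numero)]
--     a, b, c = d[0], d[1], d[2]
--     return 2 * max(a, b, c) == a + b + c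
-- ===== Notes on version B (the rewrite author's own statement) =====
-- stated objective: idiomatic
-- what changed: Replaces the three-way branch chain with the arithmetic identity 2*max(a,b,c) == a+b+c (valid for non-negative digits) over a digit list built by a comprehension instead of an explicit append loop.
import Mathlib
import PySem

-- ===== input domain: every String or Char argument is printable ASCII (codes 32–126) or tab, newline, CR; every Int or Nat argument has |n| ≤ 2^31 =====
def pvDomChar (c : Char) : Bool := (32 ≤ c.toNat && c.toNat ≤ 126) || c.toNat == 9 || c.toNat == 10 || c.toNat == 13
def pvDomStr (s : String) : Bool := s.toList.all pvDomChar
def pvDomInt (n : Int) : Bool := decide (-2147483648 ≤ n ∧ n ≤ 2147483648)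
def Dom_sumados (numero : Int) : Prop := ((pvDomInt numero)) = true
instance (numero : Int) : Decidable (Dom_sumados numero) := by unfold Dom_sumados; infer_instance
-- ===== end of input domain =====

-- B replaces A's three-branch comparison chain by the identity 2*max(a,b,c) = a+b+c on the digit list; same cost, more idiomatic.


-- ===== PORT A =====
-- int(x) for a one-character string x
def pyIntChar (c : Char) : Int := (PySem.Int.ofChars? [c]).getD 0

def sumados (numero : Int) : Bool :=
  let s := PySem.Int.toChars numero
  let lista := s.foldl (fun acc x => acc ++ [pyIntChar x]) ([] : List Int)
  let l0 := (PySem.List.pyGet? lista 0).getD 0   -- Pre_ guarantees the index is in range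
  let l1 := (PySem.List.pyGet? lista 1).getD 0
  let l2 := (PySem.List.pyGet? lista 2).getD 0
  if l0 + l1 == l2 then true
  else if l1 + l2 == l0 then true
  else if l0 + l2 == l1 then true
  else false

-- ===== PORT B =====
def sumados_alt (numero : Int) : Bool :=
  let d := (PySem.Int.toChars numero).map pyIntChar
  let a := (PySem.List.pyGet? d 0).getD 0   -- Pre_ guarantees the index is in range
  let b := (PySem.List.pyGet? d 1).getD 0
  let c := (PySem.List.pyGet? d 2).getD 0
  2 * max a (max b c) == a + b + c

-- ===== PRECONDITION & SPEC =====
-- Pre_ excludes exactly the inputs on which A raises: numero < 0 gives ValueError (int('-')),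
-- 0 ≤ numero < 100 gives IndexError (fewer than three digits).
def Pre_sumados (numero : Int) : Prop := 100 ≤ numero
instance (numero : Int) : Decidable (Pre_sumados numero) := by unfold Pre_sumados; infer_instance
def pvWitness_sumados : Int := (123)

def Spec_sumados (numero : Int) (out : Bool) : Prop := out = sumados_alt numero
instance (numero : Int) (out : Bool) : Decidable (Spec_sumados numero out) := by unfold Spec_sumados; infer_instance

-- ===== CLAIM (what is proved, stated in full; the proofs are below) =====
def Claim_equal_sumados : Prop := ∀ (numero : Int), Dom_sumados numero → Pre_sumados numero → Spec_sumados numero (sumados numero)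

-- ===== LEMMAS AND PROOFS =====

def digitChars : List Char := ['0','1','2','3','4','5','6','7','8','9']

lemma digitChar_mem (m : Nat) (h : m < 10) : Nat.digitChar m ∈ digitChars := by
  interval_cases m <;> decide

lemma toDigitsCore_mem : ∀ (fuel n : Nat) (ds : List Char), ∀ c ∈ Nat.toDigitsCore 10 fuel n ds,
    c ∈ ds ∨ c ∈ digitChars := by
  intro fuel
  induction fuel with
  | zero => intro n ds c hc; exact Or.inl hc
  | succ f ih =>
    intro n ds c hc
    simp only [Nat.toDigitsCore] at hc
    split at hc
    · rcases List.mem_cons.mp hc with h | h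
      · exact Or.inr (h ▸ digitChar_mem _ (Nat.mod_lt _ (by norm_num)))
      · exact Or.inl h
    · rcases ih _ _ _ hc with h | h
      · rcases List.mem_cons.mp h with h | h
        · exact Or.inr (h ▸ digitChar_mem _ (Nat.mod_lt _ (by norm_num)))
        · exact Or.inl h
      · exact Or.inr h

lemma toDigitsCore_len : ∀ (fuel n : Nat) (ds : List Char), 0 < fuel →
    ds.length + 1 ≤ (Nat.toDigitsCore 10 fuel n ds).length := by
  intro fuel
  induction fuel with
  | zero => intro n ds h; omega
  | succ f ih =>
    intro n ds _
    simp only [Nat.toDigitsCore]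
    split
    · simp
    · rcases Nat.eq_zero_or_pos f with hf | hf
      · subst hf; simp [Nat.toDigitsCore]
      · have := ih (n / 10) (Nat.digitChar (n % 10) :: ds) hf
        simp only [List.length_cons] at this
        omega

lemma toDigits_len_ge_three (n : Nat) (h : 100 ≤ n) : 3 ≤ (Nat.toDigits 10 n).length := by
  unfold Nat.toDigits
  have h1 : ¬ n / 10 = 0 := by omega
  have h2 : ¬ n / 10 / 10 = 0 := by rw [Nat.div_div_eq_div_mul]; omega
  rw [show n + 1 = (n - 2) + 1 + 1 + 1 from by omega]
  simp only [Nat.toDigitsCore]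
  rw [if_neg h1, if_neg h2]
  split
  · simp
  · have := toDigitsCore_len (n - 2) (n / 10 / 10 / 10)
        [Nat.digitChar (n / 10 / 10 % 10), Nat.digitChar (n / 10 % 10), Nat.digitChar (n % 10)]
        (by omega)
    simp only [List.length_cons, List.length_nil] at this
    omega

lemma pyIntChar_nonneg (c : Char) (h : c ∈ digitChars) : 0 ≤ pyIntChar c := by
  fin_cases h <;> decide

lemma tri_eq (a b c : Int) (ha : 0 ≤ a) (hb : 0 ≤ b) (hc : 0 ≤ c) :
    (if a + b == c then true else if b + c == a then true else if a + c == b then true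
     else false) = (2 * max a (max b c) == a + b + c) := by
  simp only [max_def, beq_iff_eq]
  split_ifs <;> simp_all <;> omega

-- ===== VERDICT (by name: the statement is the Claim_ definition above) =====
theorem sumados_spec : Claim_equal_sumados := by
  intro numero _ hpre
  unfold Spec_sumados sumados sumados_alt
  dsimp only
  rw [PySem.List.foldl_append_singleton_eq_map]
  have hnn : ¬ numero < 0 := by unfold Pre_sumados at hpre; omega
  have hchars : PySem.Int.toChars numero = Nat.toDigits 10 numero.toNat := by
    simp [PySem.Int.toChars, hnn]
  have hlen : 3 ≤ (PySem.Int.toChars numero).length := by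
    rw [hchars]
    exact toDigits_len_ge_three _ (by unfold Pre_sumados at hpre; omega)
  have hmem : ∀ c ∈ PySem.Int.toChars numero, c ∈ digitChars := by
    intro c hc
    rw [hchars] at hc
    rcases toDigitsCore_mem _ _ _ c hc with h | h
    · simp at h
    · exact h
  obtain ⟨c0, c1, c2, rest, hL⟩ :
      ∃ c0 c1 c2 rest, PySem.Int.toChars numero = c0 :: c1 :: c2 :: rest := by
    rcases hx : PySem.Int.toChars numero with _ | ⟨c0, t⟩
    · rw [hx] at hlen; simp at hlen
    rcases t with _ | ⟨c1, t⟩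
    · rw [hx] at hlen; simp at hlen
    rcases t with _ | ⟨c2, rest⟩
    · rw [hx] at hlen; simp at hlen
    exact ⟨c0, c1, c2, rest, rfl⟩
  rw [hL]
  have h0 := pyIntChar_nonneg c0 (hmem c0 (by simp [hL]))
  have h1 := pyIntChar_nonneg c1 (hmem c1 (by simp [hL]))
  have h2 := pyIntChar_nonneg c2 (hmem c2 (by simp [hL]))
  simp only [List.map_cons, List.nil_append]
  have g0 : PySem.List.pyGet? (pyIntChar c0 :: pyIntChar c1 :: pyIntChar c2 :: rest.map pyIntChar) 0
      = some (pyIntChar c0) := PySem.List.pyGet?_zero_cons _ _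
  have g1 : PySem.List.pyGet? (pyIntChar c0 :: pyIntChar c1 :: pyIntChar c2 :: rest.map pyIntChar) 1
      = some (pyIntChar c1) := by
    simp [PySem.List.pyGet?, PySem.List.pyIdx?, show (0:Int) ≤ (rest.length:Int) + 1 by omega]
  have g2 : PySem.List.pyGet? (pyIntChar c0 :: pyIntChar c1 :: pyIntChar c2 :: rest.map pyIntChar) 2
      = some (pyIntChar c2) := by
    simp [PySem.List.pyGet?, PySem.List.pyIdx?, show (2:Int) ≤ (rest.length:Int) + 1 + 1 by omega]
  simp only [g0, g1, g2, Option.getD_some]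
  exact tri_eq _ _ _ h0 h1 h2
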